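-- pv_equiv track=rewrite | github.com/DevooKim/algorithm-study | week2/problem/3-1Devoo.py | solution
-- ===== SOURCE A (Python) =====
-- def solution(a):
--     answer = 0
--     s = set()
--     m = a.index(min(a))
--
--     for i in range(len(a)):
--         if i < m:
--             s.add(min(a[:i+1]))
--         elif i > m:
--             s.add(min(a[i:]))
--         else:
--             s.add(a[i])
--     answer = len(s)
--     return answer
-- ===== SOURCE B (Python) =====
-- def solution(a):
--     mval = min(a)
--     m = a.index(mval)
--     s = {mval}
--     cur = None
--     for x in a[:m]:
--         cur = x if cur is None else min(cur, x)
--         s.add(cur)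
--     cur = None
--     for x in reversed(a[m + 1:]):
--         cur = x if cur is None else min(cur, x)
--         s.add(cur)
--     return len(s)
-- ===== Notes on version B (the rewrite author's own statement) =====
-- stated objective: faster
-- what changed: A recomputes min over a fresh slice at every index (quadratic); B makes one running prefix-min pass before the global minimum's index and one running suffix-min pass after it, collecting the same set of values in O(n).
import Mathlib
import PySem

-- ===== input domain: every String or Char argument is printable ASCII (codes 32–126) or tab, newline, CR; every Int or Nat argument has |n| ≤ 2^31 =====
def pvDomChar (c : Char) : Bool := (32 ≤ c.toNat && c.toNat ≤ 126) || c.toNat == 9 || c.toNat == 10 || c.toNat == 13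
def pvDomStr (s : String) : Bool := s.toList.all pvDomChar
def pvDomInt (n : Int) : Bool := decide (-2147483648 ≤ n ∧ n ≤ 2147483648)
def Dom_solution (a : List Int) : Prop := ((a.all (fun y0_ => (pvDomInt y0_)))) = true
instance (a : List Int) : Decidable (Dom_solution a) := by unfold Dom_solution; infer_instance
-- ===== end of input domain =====

-- B replaces A's per-index slice-and-min scans by one running prefix-min pass and one running
-- suffix-min pass that collect the same set of values; the returned counts are proved equal.

-- ===== PORT A =====
-- A's loop body: the three-way branch on i versus m
def aBody (a : List Int) (m : Nat) (s : PySem.Set Int) (i : Int) : PySem.Set Int :=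
  if i < (m : Int) then
    match PySem.List.min? (PySem.List.slice a none (some (i + 1))) (fun x => x) with
    | none => s   -- unreachable: the slice is nonempty
    | some v => PySem.Set.add s v
  else if (m : Int) < i then
    match PySem.List.min? (PySem.List.slice a (some i) none) (fun x => x) with
    | none => s   -- unreachable: the slice is nonempty
    | some v => PySem.Set.add s v
  else
    PySem.Set.add s (PySem.List.pyGetD a i 0)

def solution (a : List Int) : Int :=
  match PySem.List.min? a (fun x => x) with
  | none => 0      -- min([]) raises ValueError: excluded by Pre_solution
  | some mv =>
    match PySem.List.index? a mv with
    | none => 0    -- unreachable: mv ∈ a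
    | some m =>
      let s := (PySem.List.pyRange 0 (a.length : Int) 1).foldl (aBody a m) PySem.Set.empty
      PySem.Set.len s

-- ===== PORT B =====
-- one loop step of B: cur = x if cur is None else min(cur, x); s.add(cur)
def altStep (p : Option Int × PySem.Set Int) (x : Int) : Option Int × PySem.Set Int :=
  let cur : Int := match p.1 with | none => x | some c => min c x
  (some cur, PySem.Set.add p.2 cur)

def solution_alt (a : List Int) : Int :=
  match PySem.List.min? a (fun x => x) with
  | none => 0      -- min([]) raises ValueError in B too: excluded by Pre_solution
  | some mv =>
    match PySem.List.index? a mv with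
    | none => 0    -- unreachable: mv ∈ a
    | some m =>
      let s0 : PySem.Set Int := PySem.Set.add PySem.Set.empty mv
      let p1 := (PySem.List.slice a none (some (m : Int))).foldl altStep (none, s0)
      let p2 := ((PySem.List.slice a (some ((m : Int) + 1)) none).reverse).foldl altStep (none, p1.2)
      PySem.Set.len p2.2

-- ===== PRECONDITION & SPEC =====
-- Pre_ excludes only the empty list, on which A (min of an empty sequence) raises ValueError.
def Pre_solution (a : List Int) : Prop := a ≠ []
instance (a : List Int) : Decidable (Pre_solution a) := by unfold Pre_solution; infer_instance
def pvWitness_solution : List Int := [3, 1, 2]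

def Spec_solution (a : List Int) (out : Int) : Prop := out = solution_alt a
instance (a : List Int) (out : Int) : Decidable (Spec_solution a out) := by unfold Spec_solution; infer_instance

-- ===== CLAIM (what is proved, stated in full; the proofs are below) =====
def Claim_equal_solution : Prop := ∀ (a : List Int), Dom_solution a → Pre_solution a → Spec_solution a (solution a)

-- ===== LEMMAS AND PROOFS =====

-- min(l) (no key) is characterised by membership + lower bound; hence permutation-invariant.
theorem mino_eq_some_iff (l : List Int) (v : Int) :
    (PySem.List.min? l (fun x => x) = some v) ↔ v ∈ l ∧ ∀ y ∈ l, v ≤ y := by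
  constructor
  · intro h
    exact ⟨PySem.List.min?_mem h, fun y hy => PySem.List.min?_isMin h y hy⟩
  · rintro ⟨hv, hmin⟩
    rcases hw : PySem.List.min? l (fun x => x) with _ | w
    · rw [PySem.List.min?_eq_none_iff] at hw
      simp [hw] at hv
    · have h1 := PySem.List.min?_isMin hw v hv
      have h2 := hmin w (PySem.List.min?_mem hw)
      simp only [le_antisymm h1 h2]

theorem mino_perm {l l' : List Int} (h : l.Perm l') :
    PySem.List.min? l (fun x => x) = PySem.List.min? l' (fun x => x) := by
  rcases hw : PySem.List.min? l' (fun x => x) with _ | w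
  · rw [PySem.List.min?_eq_none_iff] at hw ⊢
    subst hw; exact h.eq_nil
  · rw [mino_eq_some_iff] at hw ⊢
    exact ⟨h.mem_iff.mpr hw.1, fun y hy => hw.2 y (h.mem_iff.mp hy)⟩

-- the 'min of a nonempty slice' match is just an add
theorem matchAdd (X : List Int) (hX : X ≠ []) (s : PySem.Set Int) :
    (match PySem.List.min? X (fun x => x) with
      | none => s
      | some v => PySem.Set.add s v)
    = PySem.Set.add s ((PySem.List.min? X (fun x => x)).getD 0) := by
  rcases hw : PySem.List.min? X (fun x => x) with _ | v
  · exact absurd ((PySem.List.min?_eq_none_iff X _).mp hw) hX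
  · simp

theorem mino_getD_eq (X : List Int) (hX : X ≠ []) (y : Int) :
    y = (PySem.List.min? X (fun x => x)).getD 0 ↔ PySem.List.min? X (fun x => x) = some y := by
  rcases hw : PySem.List.min? X (fun x => x) with _ | v
  · exact absurd ((PySem.List.min?_eq_none_iff X _).mp hw) hX
  · simp [eq_comm]

-- membership in a fold that only adds f i
theorem mem_foldl_add (l : List Int) (f : Int → Int) (s : PySem.Set Int) (y : Int) :
    y ∈ l.foldl (fun s i => PySem.Set.add s (f i)) s ↔ y ∈ s ∨ ∃ i ∈ l, y = f i := by
  induction l generalizing s with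
  | nil => simp
  | cons x t ih =>
    simp only [List.foldl_cons, ih, PySem.Set.mem_add, List.mem_cons]
    constructor
    · rintro ((h | h) | ⟨i, hi, rfl⟩)
      · exact Or.inl h
      · exact Or.inr ⟨x, Or.inl rfl, h⟩
      · exact Or.inr ⟨i, Or.inr hi, rfl⟩
    · rintro (h | ⟨i, (rfl | hi), rfl⟩)
      · exact Or.inl (Or.inl h)
      · exact Or.inl (Or.inr rfl)
      · exact Or.inr ⟨i, hi, rfl⟩

theorem nodup_foldl_aBody (l : List Int) (a : List Int) (m : Nat) (s : PySem.Set Int)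
    (h : s.Nodup) : (l.foldl (aBody a m) s).Nodup := by
  induction l generalizing s with
  | nil => exact h
  | cons x t ih =>
    refine ih _ ?_
    unfold aBody
    split_ifs
    · rcases hw : PySem.List.min? (PySem.List.slice a none (some (x + 1))) (fun x => x) with _ | v
      · exact h
      · exact PySem.Set.nodup_add _ _ h
    · rcases hw : PySem.List.min? (PySem.List.slice a (some x) none) (fun x => x) with _ | v
      · exact h
      · exact PySem.Set.nodup_add _ _ h
    · exact PySem.Set.nodup_add _ _ h

theorem nodup_foldl_altStep (l : List Int) (p : Option Int × PySem.Set Int) (h : p.2.Nodup) :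
    (l.foldl altStep p).2.Nodup := by
  induction l generalizing p with
  | nil => exact h
  | cons x t ih => exact ih _ (PySem.Set.nodup_add _ _ h)

-- membership after B's running-min loop, seeded with some c
theorem mem_foldl_altStep_some (l : List Int) (c : Int) (s : PySem.Set Int) (y : Int) :
    y ∈ (l.foldl altStep (some c, s)).2 ↔
      y ∈ s ∨ ∃ k : Nat, k < l.length ∧ y = (l.take (k + 1)).foldl min c := by
  induction l generalizing c s with
  | nil => simp
  | cons x t ih =>
    have hstep : (x :: t).foldl altStep (some c, s) =
        t.foldl altStep (some (min c x), PySem.Set.add s (min c x)) := by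
      simp [altStep]
    rw [hstep, ih]
    simp only [PySem.Set.mem_add, List.length_cons]
    constructor
    · rintro ((h | rfl) | ⟨k, hk, rfl⟩)
      · exact Or.inl h
      · exact Or.inr ⟨0, by omega, by simp⟩
      · exact Or.inr ⟨k + 1, by omega, by simp⟩
    · rintro (h | ⟨k, hk, rfl⟩)
      · exact Or.inl (Or.inl h)
      · match k with
        | 0 => exact Or.inl (Or.inr (by simp))
        | k + 1 => exact Or.inr ⟨k, by omega, by simp⟩

-- membership after B's running-min loop over a nonempty list, seeded with None
theorem mem_foldl_altStep_none (x : Int) (t : List Int) (s : PySem.Set Int) (y : Int) :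
    y ∈ ((x :: t).foldl altStep (none, s)).2 ↔
      y ∈ s ∨ ∃ k : Nat, k ≤ t.length ∧ y = (t.take k).foldl min x := by
  have hstep : (x :: t).foldl altStep (none, s) =
      t.foldl altStep (some x, PySem.Set.add s x) := by
    simp [altStep]
  rw [hstep, mem_foldl_altStep_some]
  simp only [PySem.Set.mem_add]
  constructor
  · rintro ((h | rfl) | ⟨k, hk, rfl⟩)
    · exact Or.inl h
    · exact Or.inr ⟨0, by omega, by simp⟩
    · exact Or.inr ⟨k + 1, by omega, by simp⟩
  · rintro (h | ⟨k, hk, rfl⟩)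
    · exact Or.inl (Or.inl h)
    · match k with
      | 0 => exact Or.inl (Or.inr (by simp))
      | k + 1 => exact Or.inr ⟨k, by omega, by simp⟩

-- membership in A's final set: prefix minima below m, a[m], suffix minima above m
theorem memA (a : List Int) (ha : a ≠ []) (m : Nat) (hm : m < a.length) (y : Int) :
    y ∈ (PySem.List.pyRange 0 (a.length : Int) 1).foldl (aBody a m) PySem.Set.empty ↔
      (∃ k : Nat, k < m ∧ PySem.List.min? (a.take (k + 1)) (fun x => x) = some y)
      ∨ y = a.getD m 0
      ∨ (∃ i : Nat, m < i ∧ i < a.length ∧ PySem.List.min? (a.drop i) (fun x => x) = some y) := by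
  have hmn : (m : Int) ≤ (a.length : Int) := by exact_mod_cast hm.le
  rw [PySem.List.pyRange_one_append 0 (m : Int) (a.length : Int) (by positivity) hmn,
      PySem.List.pyRange_one_append (m : Int) ((m : Int) + 1) (a.length : Int) (by omega)
        (by exact_mod_cast hm),
      PySem.List.pyRange_one_singleton, List.foldl_append, List.foldl_append]
  have hseg1 : (PySem.List.pyRange 0 (m : Int) 1).foldl (aBody a m) PySem.Set.empty
      = (PySem.List.pyRange 0 (m : Int) 1).foldl
          (fun s i => PySem.Set.add s ((PySem.List.min? (a.take (i + 1).toNat) (fun x => x)).getD 0))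
          PySem.Set.empty := by
    apply PySem.List.foldl_congr_mem
    intro s i hi
    rw [PySem.List.mem_pyRange_one] at hi
    have h1 : PySem.List.slice a none (some (i + 1)) = a.take (i + 1).toNat :=
      PySem.List.slice_to a (by omega)
    have h2 : a.take (i + 1).toNat ≠ [] := by
      have : 0 < (i + 1).toNat := by omega
      simp only [ne_eq, List.take_eq_nil_iff]
      rintro (h | h) <;> [omega; exact ha h]
    simp only [aBody, if_pos hi.2, h1, matchAdd _ h2]
  have hmid : ∀ s : PySem.Set Int, List.foldl (aBody a m) s [(m : Int)]
      = PySem.Set.add s (a.getD m 0) := by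
    intro s
    simp [aBody, PySem.List.pyGetD_natCast]
  have hseg3 : ∀ s : PySem.Set Int,
      (PySem.List.pyRange ((m : Int) + 1) (a.length : Int) 1).foldl (aBody a m) s
      = (PySem.List.pyRange ((m : Int) + 1) (a.length : Int) 1).foldl
          (fun s i => PySem.Set.add s ((PySem.List.min? (a.drop i.toNat) (fun x => x)).getD 0)) s := by
    intro s
    apply PySem.List.foldl_congr_mem
    intro s i hi
    rw [PySem.List.mem_pyRange_one] at hi
    have h1 : PySem.List.slice a (some i) none = a.drop i.toNat :=
      PySem.List.slice_from a (by omega)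
    have h2 : a.drop i.toNat ≠ [] := by
      simp only [ne_eq, List.drop_eq_nil_iff]
      omega
    simp only [aBody, if_neg (by omega : ¬ i < (m : Int)), if_pos (by omega : (m : Int) < i),
      h1, matchAdd _ h2]
  rw [hseg1, hmid, hseg3, mem_foldl_add, PySem.Set.mem_add, mem_foldl_add]
  constructor
  · rintro ((((h | ⟨i, hi, rfl⟩) | rfl) | ⟨i, hi, rfl⟩))
    · exact absurd h (by simp [PySem.Set.empty])
    · rw [PySem.List.mem_pyRange_one] at hi
      refine Or.inl ⟨i.toNat, by omega, ?_⟩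
      have hne : a.take ((i + 1).toNat) ≠ [] := by
        simp only [ne_eq, List.take_eq_nil_iff]
        rintro (h | h) <;> [omega; exact ha h]
      rw [show i.toNat + 1 = (i + 1).toNat from by omega]
      exact (mino_getD_eq _ hne _).mp rfl
    · exact Or.inr (Or.inl rfl)
    · rw [PySem.List.mem_pyRange_one] at hi
      refine Or.inr (Or.inr ⟨i.toNat, by omega, by omega, ?_⟩)
      have hne : a.drop i.toNat ≠ [] := by
        simp only [ne_eq, List.drop_eq_nil_iff]
        omega
      exact (mino_getD_eq _ hne _).mp rfl
  · rintro (⟨k, hk, hky⟩ | rfl | ⟨i, hi1, hi2, hiy⟩)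
    · refine Or.inl (Or.inl (Or.inr ⟨(k : Int), ?_, ?_⟩))
      · rw [PySem.List.mem_pyRange_one]; omega
      · rw [mino_getD_eq _ (by simp only [ne_eq, List.take_eq_nil_iff]; rintro (h | h) <;> [omega; exact ha h])]
        rw [show ((k : Int) + 1).toNat = k + 1 from by omega]
        exact hky
    · exact Or.inl (Or.inr rfl)
    · refine Or.inr ⟨(i : Int), ?_, ?_⟩
      · rw [PySem.List.mem_pyRange_one]; omega
      · rw [mino_getD_eq _ (by simp only [ne_eq, List.drop_eq_nil_iff]; omega)]
        rw [show ((i : Int)).toNat = i from by omega]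
        exact hiy

-- membership after B's prefix pass
theorem memB_pre (a : List Int) (ha : a ≠ []) (m : Nat) (hm : m < a.length) (s0 : PySem.Set Int) (y : Int) :
    y ∈ ((a.take m).foldl altStep (none, s0)).2 ↔
      y ∈ s0 ∨ ∃ k : Nat, k < m ∧ PySem.List.min? (a.take (k + 1)) (fun x => x) = some y := by
  rcases a with _ | ⟨h0, t⟩
  · exact absurd rfl ha
  rcases m with _ | m'
  · simp
  rw [List.take_succ_cons, mem_foldl_altStep_none]
  have hm' : m' < t.length := by simpa using hm
  have hlen : (t.take m').length = m' := by simp; omega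
  constructor
  · rintro (h | ⟨k, hk, rfl⟩)
    · exact Or.inl h
    · rw [hlen] at hk
      refine Or.inr ⟨k, by omega, ?_⟩
      rw [List.take_succ_cons, PySem.List.min?_id_cons, List.take_take,
        show min k m' = k from by omega]
  · rintro (h | ⟨k, hk, hky⟩)
    · exact Or.inl h
    · refine Or.inr ⟨k, by omega, ?_⟩
      rw [List.take_succ_cons, PySem.List.min?_id_cons] at hky
      rw [List.take_take, show min k m' = k from by omega]
      exact (Option.some.injEq _ _).mp hky.symm

-- membership after B's suffix pass
theorem memB_suf (a : List Int) (m : Nat) (s : PySem.Set Int) (y : Int) :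
    y ∈ (((a.drop (m + 1)).reverse).foldl altStep (none, s)).2 ↔
      y ∈ s ∨ ∃ i : Nat, m < i ∧ i < a.length ∧ PySem.List.min? (a.drop i) (fun x => x) = some y := by
  rcases hd : (a.drop (m + 1)).reverse with _ | ⟨x, rt⟩
  · have hlen : a.length ≤ m + 1 := by
      have := congrArg List.length hd
      simp at this
      omega
    simp only [List.foldl_nil]
    constructor
    · exact Or.inl
    · rintro (h | ⟨i, hi1, hi2, _⟩)
      · exact h
      · omega
  · have hlen : rt.length + 1 = a.length - (m + 1) := by
      have := congrArg List.length hd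
      simpa using this.symm
    have hmn : m + 1 < a.length := by
      by_contra hc
      have : a.drop (m + 1) = [] := by
        rw [List.drop_eq_nil_iff]; omega
      rw [this] at hd
      simp at hd
    have key : ∀ k : Nat, k ≤ rt.length →
        PySem.List.min? (a.drop (a.length - 1 - k)) (fun x => x)
          = some ((rt.take k).foldl min x) := by
      intro k hk
      have h1 : PySem.List.min? (((a.drop (m + 1)).reverse).take (k + 1)) (fun x => x)
          = some ((rt.take k).foldl min x) := by
        rw [hd, List.take_succ_cons]
        exact PySem.List.min?_id_cons _ _
      rw [List.take_reverse, mino_perm (List.reverse_perm _), List.drop_drop,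
        List.length_drop] at h1
      rw [show a.length - 1 - k = m + 1 + (a.length - (m + 1) - (k + 1)) from by omega]
      exact h1
    rw [mem_foldl_altStep_none]
    constructor
    · rintro (h | ⟨k, hk, rfl⟩)
      · exact Or.inl h
      · exact Or.inr ⟨a.length - 1 - k, by omega, by omega, key k hk⟩
    · rintro (h | ⟨i, hi1, hi2, hiy⟩)
      · exact Or.inl h
      · refine Or.inr ⟨a.length - 1 - i, by omega, ?_⟩
        have := key (a.length - 1 - i) (by omega)
        rw [show a.length - 1 - (a.length - 1 - i) = i from by omega] at this
        rw [hiy] at this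
        exact (Option.some.injEq _ _).mp this

-- ===== VERDICT (by name: the statement is the Claim_ definition above) =====
theorem solution_spec : Claim_equal_solution := by
  intro a _ hpre
  unfold Spec_solution solution solution_alt
  rcases ha : PySem.List.min? a (fun x => x) with _ | mv
  · exact absurd ((PySem.List.min?_eq_none_iff a _).mp ha) hpre
  rcases hidx : PySem.List.index? a mv with _ | m
  · rw [PySem.List.index?_eq_none_iff] at hidx
    exact absurd (PySem.List.min?_mem ha) hidx
  dsimp only
  rw [hidx]
  dsimp only
  obtain ⟨hm, ham, -⟩ := PySem.List.getElem_of_index?_eq_some hidx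
  have hs1 : PySem.List.slice a none (some (m : Int)) = a.take m :=
    PySem.List.slice_to_natCast a m
  have hs2 : PySem.List.slice a (some ((m : Int) + 1)) none = a.drop (m + 1) := by
    rw [show ((m : Int) + 1) = ((m + 1 : Nat) : Int) from by push_cast; ring]
    exact PySem.List.slice_from_natCast a (m + 1)
  simp only [hs1, hs2]
  -- both results are lengths of the two sets; the sets are nodup with equal membership
  have hnodA : ((PySem.List.pyRange 0 (a.length : Int) 1).foldl (aBody a m) PySem.Set.empty).Nodup :=
    nodup_foldl_aBody _ _ _ _ List.nodup_nil
  have hnodB : (((a.drop (m + 1)).reverse).foldl altStep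
      (none, ((a.take m).foldl altStep (none, PySem.Set.add PySem.Set.empty mv)).2)).2.Nodup := by
    apply nodup_foldl_altStep
    apply nodup_foldl_altStep
    exact PySem.Set.nodup_add _ _ List.nodup_nil
  have hmem : ∀ y : Int,
      y ∈ (PySem.List.pyRange 0 (a.length : Int) 1).foldl (aBody a m) PySem.Set.empty ↔
      y ∈ (((a.drop (m + 1)).reverse).foldl altStep
        (none, ((a.take m).foldl altStep (none, PySem.Set.add PySem.Set.empty mv)).2)).2 := by
    intro y
    rw [memA a hpre m hm y, memB_suf, memB_pre a hpre m hm]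
    have hgd : a.getD m 0 = mv := by
      rw [List.getD_eq_getElem a 0 hm, ham]
    have hmv : y ∈ PySem.Set.add PySem.Set.empty mv ↔ y = mv := by
      rw [PySem.Set.mem_add]
      simp [PySem.Set.empty]
    rw [hgd, hmv]
    constructor
    · rintro (h | h | h)
      exacts [Or.inl (Or.inr h), Or.inl (Or.inl h), Or.inr h]
    · rintro ((h | h) | h)
      exacts [Or.inr (Or.inl h), Or.inl h, Or.inr (Or.inr h)]
  have hperm := (List.perm_ext_iff_of_nodup hnodA hnodB).mpr hmem
  have hlen := hperm.length_eq
  show (((PySem.List.pyRange 0 (a.length : Int) 1).foldl (aBody a m) PySem.Set.empty).length : Int)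
      = ((((a.drop (m + 1)).reverse).foldl altStep
        (none, ((a.take m).foldl altStep (none, PySem.Set.add PySem.Set.empty mv)).2)).2.length : Int)
  exact_mod_cast hlen
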